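-- pv_equiv track=rewrite | github.com/Akrielz/computational_lexicology_course | lab2/lab2.py | parse_ip
-- ===== SOURCE A (Python) =====
-- from typing import List
--
-- def parse_ip(split_words: List[str]):
--     # iterate through the words and find emails
--     i = 0
--     while i < len(split_words) - 6:
--
--         current_word = split_words[i]
--         # check if current_word is a number
--         # an ip is in the next form
--         # number . number . number . number
--
--         if current_word.isdigit() and split_words[i+1] == "." and split_words[i+2].isdigit() and split_words[i+3] == "." \
--                 and split_words[i+4].isdigit() and split_words[i+5] == "." and split_words[i+6].isdigit():
--
--             dot1 = split_words.pop(i+1)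
--             number2 = split_words.pop(i+1)
--             dot2 = split_words.pop(i+1)
--             number3 = split_words.pop(i+1)
--             dot3 = split_words.pop(i+1)
--             number4 = split_words.pop(i+1)
--
--             # concatenate word at i-1 with the email
--             split_words[i] = split_words[i] + dot1 + number2 + dot2 + number3 + dot3 + number4
--
--         i += 1
--
--     return split_words
-- ===== SOURCE B (Python) =====
-- from typing import List
--
-- def parse_ip(split_words: List[str]):
--     # Single forward pass building a NEW list (no in-place mutation of the
--     # argument, unlike A); on an IP match consume 7 tokens at once.
--     out = []
--     w = split_words
--     n = len(w)
--     i = 0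
--     while i + 7 <= n:
--         if w[i].isdigit() and w[i+1] == "." and w[i+2].isdigit() and w[i+3] == "." \
--                 and w[i+4].isdigit() and w[i+5] == "." and w[i+6].isdigit():
--             out.append(w[i] + w[i+1] + w[i+2] + w[i+3] + w[i+4] + w[i+5] + w[i+6])
--             i += 7
--         else:
--             out.append(w[i])
--             i += 1
--     out.extend(w[i:])
--     return out
-- ===== Notes on version B (the rewrite author's own statement) =====
-- stated objective: alternative
-- what changed: Replaces A's in-place rewriting of the input (six pop(i+1) calls per match, then overwrite) by a single forward pass that builds a new output list and advances the index by 7 on a match.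
import Mathlib
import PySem

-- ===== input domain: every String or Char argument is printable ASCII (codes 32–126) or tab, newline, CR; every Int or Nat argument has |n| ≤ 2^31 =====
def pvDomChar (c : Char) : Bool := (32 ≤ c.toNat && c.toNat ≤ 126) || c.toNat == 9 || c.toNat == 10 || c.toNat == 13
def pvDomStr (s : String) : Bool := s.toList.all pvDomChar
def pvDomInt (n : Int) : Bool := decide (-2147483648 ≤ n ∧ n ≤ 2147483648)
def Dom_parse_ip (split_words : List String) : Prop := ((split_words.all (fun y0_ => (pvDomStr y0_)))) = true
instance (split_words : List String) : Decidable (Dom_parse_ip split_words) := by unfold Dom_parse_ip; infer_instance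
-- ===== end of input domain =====

-- B rebuilds the list in ONE forward pass (advancing 7 on a match) instead of A's
-- repeated in-place pops; equivalence is about the RETURN value only (A mutates its
-- argument in place, B does not).

-- the shared 7-token IP test (the same 'if' both Pythons write inline)
def ipCond (a b c d e f g : String) : Bool :=
  PySem.Str.strIsdigit a && (b == ".") && PySem.Str.strIsdigit c && (d == ".") &&
  PySem.Str.strIsdigit e && (f == ".") && PySem.Str.strIsdigit g

-- ===== PORT A =====
-- A's while loop; i only grows from 0, so split_words[i+k] is ws.getD (i+k) "" (index
-- always nonnegative, and in range under the guard).  The six pops are PySem.List.pop?;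
-- the 'none' fallbacks are unreachable totality guards (the guard puts i+1 in range).
def parseIpLoopA (ws : List String) (i : Nat) : List String :=
  if _h : i + 6 < ws.length then
    let current_word := ws.getD i ""
    if ipCond current_word (ws.getD (i+1) "") (ws.getD (i+2) "") (ws.getD (i+3) "")
        (ws.getD (i+4) "") (ws.getD (i+5) "") (ws.getD (i+6) "") then
      match h1 : PySem.List.pop? ws ((i+1 : Nat) : Int) with
      | none => ws
      | some (dot1, ws1) =>
        match h2 : PySem.List.pop? ws1 ((i+1 : Nat) : Int) with
        | none => ws1
        | some (number2, ws2) =>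
          match h3 : PySem.List.pop? ws2 ((i+1 : Nat) : Int) with
          | none => ws2
          | some (dot2, ws3) =>
            match h4 : PySem.List.pop? ws3 ((i+1 : Nat) : Int) with
            | none => ws3
            | some (number3, ws4) =>
              match h5 : PySem.List.pop? ws4 ((i+1 : Nat) : Int) with
              | none => ws4
              | some (dot3, ws5) =>
                match h6 : PySem.List.pop? ws5 ((i+1 : Nat) : Int) with
                | none => ws5
                | some (number4, ws6) =>
                  parseIpLoopA
                    (ws6.set i (ws6.getD i "" ++ dot1 ++ number2 ++ dot2 ++ number3 ++ dot3 ++ number4))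
                    (i+1)
    else parseIpLoopA ws (i+1)
  else ws
termination_by ws.length - i
decreasing_by
  · have l1 := PySem.List.length_of_pop?_eq_some ws h1
    have l2 := PySem.List.length_of_pop?_eq_some ws1 h2
    have l3 := PySem.List.length_of_pop?_eq_some ws2 h3
    have l4 := PySem.List.length_of_pop?_eq_some ws3 h4
    have l5 := PySem.List.length_of_pop?_eq_some ws4 h5
    have l6 := PySem.List.length_of_pop?_eq_some ws5 h6
    dsimp only at l1 l2 l3 l4 l5 l6
    simp only [List.length_set]
    omega
  · omega

def parse_ip (split_words : List String) : List String :=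
  parseIpLoopA split_words 0

-- ===== PORT B =====
-- Source B's while loop over an index into the (unchanged) input, with an output accumulator;
-- i only grows from 0, so w[i+k] is ws.getD (i+k) "" and w[i:] is ws.drop i.
def parseIpLoopB (ws : List String) (i : Nat) (out : List String) : List String :=
  if _h : i + 7 ≤ ws.length then
    if ipCond (ws.getD i "") (ws.getD (i+1) "") (ws.getD (i+2) "") (ws.getD (i+3) "")
        (ws.getD (i+4) "") (ws.getD (i+5) "") (ws.getD (i+6) "") then
      parseIpLoopB ws (i+7)
        (out ++ [ws.getD i "" ++ ws.getD (i+1) "" ++ ws.getD (i+2) "" ++ ws.getD (i+3) "" ++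
                 ws.getD (i+4) "" ++ ws.getD (i+5) "" ++ ws.getD (i+6) ""])
    else parseIpLoopB ws (i+1) (out ++ [ws.getD i ""])
  else out ++ ws.drop i
termination_by ws.length - i
decreasing_by
  · omega
  · omega

def parse_ip_alt (split_words : List String) : List String :=
  parseIpLoopB split_words 0 []

-- ===== PRECONDITION & SPEC =====
def Spec_parse_ip (split_words : List String) (out : List String) : Prop := out = parse_ip_alt split_words
instance (split_words : List String) (out : List String) : Decidable (Spec_parse_ip split_words out) := by unfold Spec_parse_ip; infer_instance

-- ===== CLAIM (what is proved, stated in full; the proofs are below) =====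
def Claim_equal_parse_ip : Prop := ∀ (split_words : List String), Dom_parse_ip split_words → Spec_parse_ip split_words (parse_ip split_words)

-- ===== LEMMAS AND PROOFS =====

-- proof-side reference recursion over the remaining suffix
def specLoop : List String → List String
  | a :: b :: c :: d :: e :: f :: g :: rest =>
    if ipCond a b c d e f g then
      (a ++ b ++ c ++ d ++ e ++ f ++ g) :: specLoop rest
    else
      a :: specLoop (b :: c :: d :: e :: f :: g :: rest)
  | xs => xs

theorem specLoop_short {xs : List String} (h : xs.length ≤ 6) : specLoop xs = xs := by
  match xs with
  | [] => rfl
  | [a] => rfl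
  | [a, b] => rfl
  | [a, b, c] => rfl
  | [a, b, c, d] => rfl
  | [a, b, c, d, e] => rfl
  | [a, b, c, d, e, f] => rfl
  | a :: b :: c :: d :: e :: f :: g :: rest => simp at h; omega

theorem eraseIdx_append_len (out ys : List String) (k : Nat) :
    (out ++ ys).eraseIdx (out.length + k) = out ++ ys.eraseIdx k := by
  induction out with
  | nil => simp
  | cons a out ih =>
    have h : (a :: out).length + k = (out.length + k) + 1 := by
      rw [List.length_cons]; omega
    rw [List.cons_append, h, List.eraseIdx_cons_succ, ih, List.cons_append]

theorem pop_mid (out : List String) (x y : String) (rest : List String) :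
    PySem.List.pop? (out ++ x :: y :: rest) ((out.length + 1 : Nat) : Int) =
      some (y, out ++ x :: rest) := by
  rw [PySem.List.pop?_natCast _ _ (by simp)]
  rw [List.getElem_append_right (by omega), eraseIdx_append_len]
  simp

theorem loopA_eq (n : Nat) : ∀ rem out : List String, rem.length = n →
    parseIpLoopA (out ++ rem) out.length = out ++ specLoop rem := by
  induction n using Nat.strong_induction_on with
  | _ n ih =>
    intro rem out hn
    match rem with
    | a :: b :: c :: d :: e :: f :: g :: rest =>
      simp only [List.length_cons] at hn
      rw [parseIpLoopA]
      have hlt : out.length + 6 < (out ++ a :: b :: c :: d :: e :: f :: g :: rest).length := by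
        simp
      simp only [dif_pos hlt]
      have hg : ∀ k : Nat, k ≤ 6 →
          (out ++ a :: b :: c :: d :: e :: f :: g :: rest).getD (out.length + k) "" =
            ([a, b, c, d, e, f, g].getD k "") := by
        intro k hk
        rw [List.getD_eq_getElem?_getD, List.getElem?_append_right (by omega)]
        simp only [Nat.add_sub_cancel_left]
        rw [← List.getD_eq_getElem?_getD]
        have : (a :: b :: c :: d :: e :: f :: g :: rest).getD k "" = [a,b,c,d,e,f,g].getD k "" := by
          interval_cases k <;> rfl
        exact this
      have h0 : (out ++ a :: b :: c :: d :: e :: f :: g :: rest).getD out.length "" = a := by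
        simpa using hg 0 (by omega)
      have h1 : (out ++ a :: b :: c :: d :: e :: f :: g :: rest).getD (out.length + 1) "" = b := by
        simpa using hg 1 (by omega)
      have h2 : (out ++ a :: b :: c :: d :: e :: f :: g :: rest).getD (out.length + 2) "" = c := by
        simpa using hg 2 (by omega)
      have h3 : (out ++ a :: b :: c :: d :: e :: f :: g :: rest).getD (out.length + 3) "" = d := by
        simpa using hg 3 (by omega)
      have h4 : (out ++ a :: b :: c :: d :: e :: f :: g :: rest).getD (out.length + 4) "" = e := by
        simpa using hg 4 (by omega)
      have h5 : (out ++ a :: b :: c :: d :: e :: f :: g :: rest).getD (out.length + 5) "" = f := by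
        simpa using hg 5 (by omega)
      have h6 : (out ++ a :: b :: c :: d :: e :: f :: g :: rest).getD (out.length + 6) "" = g := by
        simpa using hg 6 (by omega)
      simp only [h0, h1, h2, h3, h4, h5, h6]
      by_cases hc : ipCond a b c d e f g = true
      · simp only [hc, if_true]
        split
        next h1' =>
          rw [pop_mid out a b (c :: d :: e :: f :: g :: rest)] at h1'; simp at h1'
        next dot1 ws1 h1' =>
        rw [pop_mid out a b (c :: d :: e :: f :: g :: rest)] at h1'
        simp only [Option.some.injEq, Prod.mk.injEq] at h1'
        obtain ⟨rfl, rfl⟩ := h1'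
        split
        next h2' =>
          rw [pop_mid out a c (d :: e :: f :: g :: rest)] at h2'; simp at h2'
        next number2 ws2 h2' =>
        rw [pop_mid out a c (d :: e :: f :: g :: rest)] at h2'
        simp only [Option.some.injEq, Prod.mk.injEq] at h2'
        obtain ⟨rfl, rfl⟩ := h2'
        split
        next h3' =>
          rw [pop_mid out a d (e :: f :: g :: rest)] at h3'; simp at h3'
        next dot2 ws3 h3' =>
        rw [pop_mid out a d (e :: f :: g :: rest)] at h3'
        simp only [Option.some.injEq, Prod.mk.injEq] at h3'
        obtain ⟨rfl, rfl⟩ := h3'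
        split
        next h4' =>
          rw [pop_mid out a e (f :: g :: rest)] at h4'; simp at h4'
        next number3 ws4 h4' =>
        rw [pop_mid out a e (f :: g :: rest)] at h4'
        simp only [Option.some.injEq, Prod.mk.injEq] at h4'
        obtain ⟨rfl, rfl⟩ := h4'
        split
        next h5' =>
          rw [pop_mid out a f (g :: rest)] at h5'; simp at h5'
        next dot3 ws5 h5' =>
        rw [pop_mid out a f (g :: rest)] at h5'
        simp only [Option.some.injEq, Prod.mk.injEq] at h5'
        obtain ⟨rfl, rfl⟩ := h5'
        split
        next h6' =>
          rw [pop_mid out a g rest] at h6'; simp at h6'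
        next number4 ws6 h6' =>
        rw [pop_mid out a g rest] at h6'
        simp only [Option.some.injEq, Prod.mk.injEq] at h6'
        obtain ⟨rfl, rfl⟩ := h6'
        have hset : (out ++ a :: rest).set out.length
            ((out ++ a :: rest).getD out.length "" ++ b ++ c ++ d ++ e ++ f ++ g) =
            out ++ (a ++ b ++ c ++ d ++ e ++ f ++ g) :: rest := by
          have ha : (out ++ a :: rest).getD out.length "" = a := by
            rw [List.getD_eq_getElem?_getD, List.getElem?_append_right (by omega)]
            simp
          rw [ha, List.set_append_right _ _ (by omega)]
          simp
        rw [hset]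
        have hsplit : out ++ (a ++ b ++ c ++ d ++ e ++ f ++ g) :: rest =
            (out ++ [a ++ b ++ c ++ d ++ e ++ f ++ g]) ++ rest := by simp
        rw [hsplit]
        have hlen : (out ++ [a ++ b ++ c ++ d ++ e ++ f ++ g]).length = out.length + 1 := by simp
        rw [← hlen, ih rest.length (by omega) rest _ rfl]
        simp [specLoop, hc]
      · simp only [hc, if_false]
        have hsplit : out ++ a :: b :: c :: d :: e :: f :: g :: rest =
            (out ++ [a]) ++ (b :: c :: d :: e :: f :: g :: rest) := by simp
        rw [hsplit]
        have hlen : (out ++ [a]).length = out.length + 1 := by simp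
        rw [← hlen, ih (6 + rest.length) (by omega) (b :: c :: d :: e :: f :: g :: rest) _
          (by simp only [List.length_cons]; omega)]
        simp [specLoop, hc]
    | [] => rw [parseIpLoopA]; simp [specLoop]
    | [a] => rw [parseIpLoopA]; simp; exact (specLoop_short (by simp)).symm
    | [a, b] => rw [parseIpLoopA]; simp; exact (specLoop_short (by simp)).symm
    | [a, b, c] => rw [parseIpLoopA]; simp; exact (specLoop_short (by simp)).symm
    | [a, b, c, d] => rw [parseIpLoopA]; simp; exact (specLoop_short (by simp)).symm
    | [a, b, c, d, e] => rw [parseIpLoopA]; simp; exact (specLoop_short (by simp)).symm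
    | [a, b, c, d, e, f] => rw [parseIpLoopA]; simp; exact (specLoop_short (by simp)).symm

theorem loopB_eq (n : Nat) : ∀ (ws : List String) (i : Nat) (out : List String),
    ws.length - i = n → parseIpLoopB ws i out = out ++ specLoop (ws.drop i) := by
  induction n using Nat.strong_induction_on with
  | _ n ih =>
    intro ws i out hn
    rw [parseIpLoopB]
    by_cases h7 : i + 7 ≤ ws.length
    · simp only [dif_pos h7]
      have e0 : ws.getD i "" = ws[i]'(by omega) := by
        rw [List.getD_eq_getElem?_getD, List.getElem?_eq_getElem (by omega)]; rfl
      have e1 : ws.getD (i+1) "" = ws[i+1]'(by omega) := by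
        rw [List.getD_eq_getElem?_getD, List.getElem?_eq_getElem (by omega)]; rfl
      have e2 : ws.getD (i+2) "" = ws[i+2]'(by omega) := by
        rw [List.getD_eq_getElem?_getD, List.getElem?_eq_getElem (by omega)]; rfl
      have e3 : ws.getD (i+3) "" = ws[i+3]'(by omega) := by
        rw [List.getD_eq_getElem?_getD, List.getElem?_eq_getElem (by omega)]; rfl
      have e4 : ws.getD (i+4) "" = ws[i+4]'(by omega) := by
        rw [List.getD_eq_getElem?_getD, List.getElem?_eq_getElem (by omega)]; rfl
      have e5 : ws.getD (i+5) "" = ws[i+5]'(by omega) := by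
        rw [List.getD_eq_getElem?_getD, List.getElem?_eq_getElem (by omega)]; rfl
      have e6 : ws.getD (i+6) "" = ws[i+6]'(by omega) := by
        rw [List.getD_eq_getElem?_getD, List.getElem?_eq_getElem (by omega)]; rfl
      have hstep : ∀ m, ∀ hm : m < ws.length, ws.drop m = ws[m]'hm :: ws.drop (m+1) :=
        fun m hm => List.drop_eq_getElem_cons hm
      have hrem : ws.drop i =
          ws.getD i "" :: ws.getD (i+1) "" :: ws.getD (i+2) "" :: ws.getD (i+3) "" ::
          ws.getD (i+4) "" :: ws.getD (i+5) "" :: ws.getD (i+6) "" :: ws.drop (i+7) := by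
        rw [e0, e1, e2, e3, e4, e5, e6]
        rw [hstep i (by omega), hstep (i+1) (by omega), hstep (i+2) (by omega),
            hstep (i+3) (by omega), hstep (i+4) (by omega), hstep (i+5) (by omega),
            hstep (i+6) (by omega)]
      have hrem1 : ws.drop (i+1) =
          ws.getD (i+1) "" :: ws.getD (i+2) "" :: ws.getD (i+3) "" ::
          ws.getD (i+4) "" :: ws.getD (i+5) "" :: ws.getD (i+6) "" :: ws.drop (i+7) := by
        rw [e1, e2, e3, e4, e5, e6]
        rw [hstep (i+1) (by omega), hstep (i+2) (by omega),
            hstep (i+3) (by omega), hstep (i+4) (by omega), hstep (i+5) (by omega),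
            hstep (i+6) (by omega)]
      by_cases hc : ipCond (ws.getD i "") (ws.getD (i+1) "") (ws.getD (i+2) "")
          (ws.getD (i+3) "") (ws.getD (i+4) "") (ws.getD (i+5) "") (ws.getD (i+6) "") = true
      · simp only [hc, if_true]
        rw [ih (ws.length - (i+7)) (by omega) ws (i+7) _ rfl]
        conv_rhs => rw [hrem]
        simp only [specLoop, hc, if_true]
        simp
      · simp only [hc, if_false]
        rw [ih (ws.length - (i+1)) (by omega) ws (i+1) _ rfl]
        conv_rhs => rw [hrem]
        simp only [specLoop, hc, if_false]
        rw [hrem1]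
        simp
    · simp only [dif_neg h7]
      rw [specLoop_short (by simp; omega)]

-- ===== VERDICT (by name: the statement is the Claim_ definition above) =====
theorem parse_ip_spec : Claim_equal_parse_ip := by
  intro ws _
  unfold Spec_parse_ip parse_ip parse_ip_alt
  have ha := loopA_eq ws.length ws [] rfl
  have hb := loopB_eq ws.length ws 0 [] (by omega)
  simp only [List.nil_append, List.length_nil] at ha hb
  rw [ha, hb]
  simp
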